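-- pv_equiv track=rewrite | github.com/ErickRafael/code-graph-platform | app/semantic_query_enhancer.py | _identify_count_type
-- ===== SOURCE A (Python) =====
-- def _identify_count_type(question_lower: str) -> str:
--     """Identify what the user wants to count with improved detection."""
--
--     # Geometric features first
--     if any(term in question_lower for term in ["circle", "circular", "circulo", "round"]):
--         return "circles"
--     elif any(term in question_lower for term in ["feature", "geometric", "geometr"]):
--         return "features"
--
--     # Building elements
--     elif any(term in question_lower for term in ["sala", "room", "space", "ambiente"]):
--         return "spaces"
--     elif any(term in question_lower for term in ["parede", "wall"]):
--         return "walls"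
--     elif any(term in question_lower for term in ["andar", "floor", "nivel"]):
--         return "floors"
--     elif any(term in question_lower for term in ["escada", "stair"]):
--         return "stairs"
--
--     else:
--         return "elements"
-- ===== SOURCE B (Python) =====
-- _TERM_PRIO = {
--     "circle": 0, "circular": 0, "circulo": 0, "round": 0,
--     "feature": 1, "geometric": 1, "geometr": 1,
--     "sala": 2, "room": 2, "space": 2, "ambiente": 2,
--     "parede": 3, "wall": 3,
--     "andar": 4, "floor": 4, "nivel": 4,
--     "escada": 5, "stair": 5,
-- }
-- _LABELS = ["circles", "features", "spaces", "walls", "floors", "stairs", "elements"]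
--
--
-- def _identify_count_type(question_lower: str) -> str:
--     """Single left-to-right scan: at each position record the best (lowest)
--     priority of any keyword starting there; the label of the overall best
--     priority wins (7th label = no keyword at all)."""
--     best = 6
--     for i in range(len(question_lower)):
--         for term, prio in _TERM_PRIO.items():
--             if question_lower.startswith(term, i):
--                 best = min(best, prio)
--     return _LABELS[best]
-- ===== Notes on version B (the rewrite author's own statement) =====
-- stated objective: alternative
-- what changed: Instead of A's per-category containment ladder (one substring search per term), B makes a single left-to-right scan over the string, records the minimum priority of any keyword starting at each position, and returns that priority's label.
import Mathlib
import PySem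

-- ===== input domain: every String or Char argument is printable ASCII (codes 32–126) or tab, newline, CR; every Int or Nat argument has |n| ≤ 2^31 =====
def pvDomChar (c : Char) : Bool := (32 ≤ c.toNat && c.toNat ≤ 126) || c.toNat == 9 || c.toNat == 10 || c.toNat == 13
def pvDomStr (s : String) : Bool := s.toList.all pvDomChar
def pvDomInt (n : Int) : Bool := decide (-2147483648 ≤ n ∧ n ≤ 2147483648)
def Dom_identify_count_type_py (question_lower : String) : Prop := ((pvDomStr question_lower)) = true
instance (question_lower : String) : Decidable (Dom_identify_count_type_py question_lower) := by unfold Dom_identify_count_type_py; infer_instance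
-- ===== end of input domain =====

-- B replaces A's per-category containment ladder by a single left-to-right scan that keeps the
-- minimum priority of any keyword starting at each position, then looks the label up (alternative algorithm, same result).

-- ===== PORT A =====
def identify_count_type_py (question_lower : String) : String :=
  if ["circle", "circular", "circulo", "round"].any (fun term => PySem.Str.isIn term question_lower) then
    "circles"
  else if ["feature", "geometric", "geometr"].any (fun term => PySem.Str.isIn term question_lower) then
    "features"
  else if ["sala", "room", "space", "ambiente"].any (fun term => PySem.Str.isIn term question_lower) then
    "spaces"
  else if ["parede", "wall"].any (fun term => PySem.Str.isIn term question_lower) then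
    "walls"
  else if ["andar", "floor", "nivel"].any (fun term => PySem.Str.isIn term question_lower) then
    "floors"
  else if ["escada", "stair"].any (fun term => PySem.Str.isIn term question_lower) then
    "stairs"
  else
    "elements"

-- ===== PORT B =====
-- the _TERM_PRIO dict of Source B (insertion order kept; lookups are only iterated, so an assoc list is exact)
def pvTermPrio : List (String × Nat) :=
  [("circle", 0), ("circular", 0), ("circulo", 0), ("round", 0),
   ("feature", 1), ("geometric", 1), ("geometr", 1),
   ("sala", 2), ("room", 2), ("space", 2), ("ambiente", 2),
   ("parede", 3), ("wall", 3),
   ("andar", 4), ("floor", 4), ("nivel", 4),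
   ("escada", 5), ("stair", 5)]

def pvLabels : List String :=
  ["circles", "features", "spaces", "walls", "floors", "stairs", "elements"]

-- inner loop of Source B: fold the dict items, lowering `best` when the keyword starts at position i
-- (question_lower.startswith(term, i) = the suffix from i starts with term; i ≥ 0 always here)
def pvInner (suffix : List Char) (best : Nat) : Nat :=
  pvTermPrio.foldl (fun b tp => if PySem.Chars.startswith suffix tp.1.toList then min b tp.2 else b) best

-- outer loop of Source B over range(len(question_lower)) (all indices nonnegative, ported as List.range)
def pvBest (q : List Char) : Nat :=
  (List.range q.length).foldl (fun best i => pvInner (q.drop i) best) 6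

def identify_count_type_py_alt (question_lower : String) : String :=
  -- _LABELS[best]: best ≤ 6 always, so the index is in range; getD's default is never used
  pvLabels.getD (pvBest question_lower.toList) "elements"

-- ===== PRECONDITION & SPEC =====
def Spec_identify_count_type_py (question_lower : String) (out : String) : Prop := out = identify_count_type_py_alt question_lower
instance (question_lower : String) (out : String) : Decidable (Spec_identify_count_type_py question_lower out) := by unfold Spec_identify_count_type_py; infer_instance

-- ===== CLAIM (what is proved, stated in full; the proofs are below) =====
def Claim_equal_identify_count_type_py : Prop := ∀ (question_lower : String), Dom_identify_count_type_py question_lower → Spec_identify_count_type_py question_lower (identify_count_type_py question_lower)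

-- ===== LEMMAS AND PROOFS =====

-- the inner fold is ≤ k iff the accumulator already is, or some matching term has priority ≤ k
theorem pvInnerFold_le_iff (l : List (String × Nat)) (c : String → Bool) (b k : Nat) :
    l.foldl (fun b tp => if c tp.1 then min b tp.2 else b) b ≤ k ↔
      b ≤ k ∨ ∃ tp ∈ l, c tp.1 = true ∧ tp.2 ≤ k := by
  induction l generalizing b with
  | nil => simp
  | cons tp l ih =>
      simp only [List.foldl_cons, List.mem_cons]
      rw [ih]
      by_cases h : c tp.1 = true
      · simp only [h, if_true, min_le_iff]
        constructor
        · rintro ((h1 | h1) | ⟨x, hx, hc, hp⟩)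
          · exact Or.inl h1
          · exact Or.inr ⟨tp, Or.inl rfl, h, h1⟩
          · exact Or.inr ⟨x, Or.inr hx, hc, hp⟩
        · rintro (h1 | ⟨x, rfl | hx, hc, hp⟩)
          · exact Or.inl (Or.inl h1)
          · exact Or.inl (Or.inr hp)
          · exact Or.inr ⟨x, hx, hc, hp⟩
      · simp only [h]
        constructor
        · rintro (h1 | ⟨x, hx, hc, hp⟩)
          · exact Or.inl h1
          · exact Or.inr ⟨x, Or.inr hx, hc, hp⟩
        · rintro (h1 | ⟨x, rfl | hx, hc, hp⟩)
          · exact Or.inl h1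
          · exact absurd hc h
          · exact Or.inr ⟨x, hx, hc, hp⟩

theorem pvInner_le_iff (s : List Char) (b k : Nat) :
    pvInner s b ≤ k ↔
      b ≤ k ∨ ∃ tp ∈ pvTermPrio, PySem.Chars.startswith s tp.1.toList = true ∧ tp.2 ≤ k := by
  exact pvInnerFold_le_iff pvTermPrio (fun t => PySem.Chars.startswith s t.toList) b k

theorem pvBestFold_le_iff (q : List Char) (l : List Nat) (b k : Nat) :
    l.foldl (fun best i => pvInner (q.drop i) best) b ≤ k ↔
      b ≤ k ∨ ∃ i ∈ l, ∃ tp ∈ pvTermPrio,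
        PySem.Chars.startswith (q.drop i) tp.1.toList = true ∧ tp.2 ≤ k := by
  induction l generalizing b with
  | nil => simp
  | cons i l ih =>
      simp only [List.foldl_cons, ih, pvInner_le_iff, List.mem_cons]
      constructor
      · rintro ((h | h) | ⟨j, hj, hrest⟩)
        · exact Or.inl h
        · exact Or.inr ⟨i, Or.inl rfl, h⟩
        · exact Or.inr ⟨j, Or.inr hj, hrest⟩
      · rintro (h | ⟨j, rfl | hj, hrest⟩)
        · exact Or.inl (Or.inl h)
        · exact Or.inl (Or.inr hrest)
        · exact Or.inr ⟨j, hj, hrest⟩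

theorem pvTerms_ne_nil : ∀ tp ∈ pvTermPrio, tp.1.toList ≠ [] := by decide

-- a nonempty keyword occurs in q iff it starts at some position of range(len(q))
theorem pvOccurs_iff (q : List Char) (t : List Char) (ht : t ≠ []) :
    (∃ i ∈ List.range q.length, PySem.Chars.startswith (q.drop i) t = true) ↔
      PySem.Chars.isIn t q = true := by
  rw [← PySem.Chars.exists_prefix_drop_iff_isIn]
  constructor
  · rintro ⟨i, _, h⟩
    exact ⟨i, (PySem.Chars.startswith_iff _ _).mp h⟩
  · rintro ⟨j, hj⟩
    by_cases hlt : j < q.length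
    · exact ⟨j, List.mem_range.mpr hlt, (PySem.Chars.startswith_iff _ _).mpr hj⟩
    · exfalso
      rw [List.drop_eq_nil_of_le (Nat.le_of_not_lt hlt)] at hj
      exact ht (List.prefix_nil.mp hj)

theorem pvBest_le_iff (q : List Char) (k : Nat) :
    pvBest q ≤ k ↔
      6 ≤ k ∨ ∃ tp ∈ pvTermPrio, tp.2 ≤ k ∧ PySem.Chars.isIn tp.1.toList q = true := by
  unfold pvBest
  rw [pvBestFold_le_iff]
  constructor
  · rintro (h | ⟨i, hi, tp, htp, hsw, hle⟩)
    · exact Or.inl h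
    · refine Or.inr ⟨tp, htp, hle, ?_⟩
      have ht : tp.1.toList ≠ [] := pvTerms_ne_nil tp htp
      exact (pvOccurs_iff q tp.1.toList ht).mp ⟨i, hi, hsw⟩
  · rintro (h | ⟨tp, htp, hle, hin⟩)
    · exact Or.inl h
    · have ht : tp.1.toList ≠ [] := pvTerms_ne_nil tp htp
      rcases (pvOccurs_iff q tp.1.toList ht).mpr hin with ⟨i, hi, hsw⟩
      exact Or.inr ⟨i, hi, tp, htp, hsw, hle⟩

theorem pvBest_le_six (q : List Char) : pvBest q ≤ 6 :=
  (pvBest_le_iff q 6).mpr (Or.inl le_rfl)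

-- ===== VERDICT (by name: the statement is the Claim_ definition above) =====
theorem identify_count_type_py_spec : Claim_equal_identify_count_type_py := by
  intro q _
  unfold Spec_identify_count_type_py identify_count_type_py identify_count_type_py_alt
  have h6 := pvBest_le_six q.toList
  have G0 : pvBest q.toList ≤ 0 ↔
      (["circle", "circular", "circulo", "round"].any (fun term => PySem.Str.isIn term q)) = true := by
    rw [pvBest_le_iff]; simp [pvTermPrio]
  have G1 : pvBest q.toList ≤ 1 ↔
      ((["circle", "circular", "circulo", "round"].any (fun term => PySem.Str.isIn term q)) = true ∨
       (["feature", "geometric", "geometr"].any (fun term => PySem.Str.isIn term q)) = true) := by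
    rw [pvBest_le_iff]; simp [pvTermPrio, or_assoc]
  have G2 : pvBest q.toList ≤ 2 ↔
      ((["circle", "circular", "circulo", "round"].any (fun term => PySem.Str.isIn term q)) = true ∨
       (["feature", "geometric", "geometr"].any (fun term => PySem.Str.isIn term q)) = true ∨
       (["sala", "room", "space", "ambiente"].any (fun term => PySem.Str.isIn term q)) = true) := by
    rw [pvBest_le_iff]; simp [pvTermPrio, or_assoc]
  have G3 : pvBest q.toList ≤ 3 ↔
      ((["circle", "circular", "circulo", "round"].any (fun term => PySem.Str.isIn term q)) = true ∨
       (["feature", "geometric", "geometr"].any (fun term => PySem.Str.isIn term q)) = true ∨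
       (["sala", "room", "space", "ambiente"].any (fun term => PySem.Str.isIn term q)) = true ∨
       (["parede", "wall"].any (fun term => PySem.Str.isIn term q)) = true) := by
    rw [pvBest_le_iff]; simp [pvTermPrio, or_assoc]
  have G4 : pvBest q.toList ≤ 4 ↔
      ((["circle", "circular", "circulo", "round"].any (fun term => PySem.Str.isIn term q)) = true ∨
       (["feature", "geometric", "geometr"].any (fun term => PySem.Str.isIn term q)) = true ∨
       (["sala", "room", "space", "ambiente"].any (fun term => PySem.Str.isIn term q)) = true ∨
       (["parede", "wall"].any (fun term => PySem.Str.isIn term q)) = true ∨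
       (["andar", "floor", "nivel"].any (fun term => PySem.Str.isIn term q)) = true) := by
    rw [pvBest_le_iff]; simp [pvTermPrio, or_assoc]
  have G5 : pvBest q.toList ≤ 5 ↔
      ((["circle", "circular", "circulo", "round"].any (fun term => PySem.Str.isIn term q)) = true ∨
       (["feature", "geometric", "geometr"].any (fun term => PySem.Str.isIn term q)) = true ∨
       (["sala", "room", "space", "ambiente"].any (fun term => PySem.Str.isIn term q)) = true ∨
       (["parede", "wall"].any (fun term => PySem.Str.isIn term q)) = true ∨
       (["andar", "floor", "nivel"].any (fun term => PySem.Str.isIn term q)) = true ∨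
       (["escada", "stair"].any (fun term => PySem.Str.isIn term q)) = true) := by
    rw [pvBest_le_iff]; simp [pvTermPrio, or_assoc]
  by_cases h0 : (["circle", "circular", "circulo", "round"].any (fun term => PySem.Str.isIn term q)) = true
  · have hM : pvBest q.toList = 0 := Nat.le_zero.mp (G0.mpr h0)
    rw [if_pos h0, hM]; rfl
  · by_cases h1 : (["feature", "geometric", "geometr"].any (fun term => PySem.Str.isIn term q)) = true
    · have hle := G1.mpr (Or.inr h1)
      have hgt : ¬ pvBest q.toList ≤ 0 := fun h => h0 (G0.mp h)
      have hM : pvBest q.toList = 1 := by omega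
      rw [if_neg h0, if_pos h1, hM]; rfl
    · by_cases h2 : (["sala", "room", "space", "ambiente"].any (fun term => PySem.Str.isIn term q)) = true
      · have hle := G2.mpr (Or.inr (Or.inr h2))
        have hgt : ¬ pvBest q.toList ≤ 1 := fun h => (G1.mp h).elim h0 h1
        have hM : pvBest q.toList = 2 := by omega
        rw [if_neg h0, if_neg h1, if_pos h2, hM]; rfl
      · by_cases h3 : (["parede", "wall"].any (fun term => PySem.Str.isIn term q)) = true
        · have hle := G3.mpr (Or.inr (Or.inr (Or.inr h3)))
          have hgt : ¬ pvBest q.toList ≤ 2 := fun h => (G2.mp h).elim h0 (fun h' => h'.elim h1 h2)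
          have hM : pvBest q.toList = 3 := by omega
          rw [if_neg h0, if_neg h1, if_neg h2, if_pos h3, hM]; rfl
        · by_cases h4 : (["andar", "floor", "nivel"].any (fun term => PySem.Str.isIn term q)) = true
          · have hle := G4.mpr (Or.inr (Or.inr (Or.inr (Or.inr h4))))
            have hgt : ¬ pvBest q.toList ≤ 3 := fun h =>
              (G3.mp h).elim h0 (fun h' => h'.elim h1 (fun h'' => h''.elim h2 h3))
            have hM : pvBest q.toList = 4 := by omega
            rw [if_neg h0, if_neg h1, if_neg h2, if_neg h3, if_pos h4, hM]; rfl
          · by_cases h5 : (["escada", "stair"].any (fun term => PySem.Str.isIn term q)) = true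
            · have hle := G5.mpr (Or.inr (Or.inr (Or.inr (Or.inr (Or.inr h5)))))
              have hgt : ¬ pvBest q.toList ≤ 4 := fun h =>
                (G4.mp h).elim h0 (fun h' => h'.elim h1 (fun h'' => h''.elim h2 (fun h3' => h3'.elim h3 h4)))
              have hM : pvBest q.toList = 5 := by omega
              rw [if_neg h0, if_neg h1, if_neg h2, if_neg h3, if_neg h4, if_pos h5, hM]; rfl
            · have hgt : ¬ pvBest q.toList ≤ 5 := fun h =>
                (G5.mp h).elim h0 (fun h' => h'.elim h1 (fun h'' => h''.elim h2 (fun h3' => h3'.elim h3 (fun h4' => h4'.elim h4 h5))))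
              have hM : pvBest q.toList = 6 := by omega
              rw [if_neg h0, if_neg h1, if_neg h2, if_neg h3, if_neg h4, if_neg h5, hM]; rfl
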